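-- pv_equiv track=rewrite | github.com/C-Kernel-Engine/C-Kernel-Engine | version/v7/scripts/check_backprop_plumbing_v7.py | _extract_layer
-- ===== SOURCE A (Python) =====
-- from typing import Any, Dict, Iterable, List, Optional, Set, Tuple
--
-- def _extract_layer(name: str) -> Optional[int]:
--     # Accept IDs like:
--     # - weight.layer.22.w1
--     # - grad.weight.layer.22.w1
--     # - act.L22.residual_add.1.out
--     if ".layer." in name:
--         marker = ".layer."
--         s = name.split(marker, 1)[1]
--         num = s.split(".", 1)[0]
--         if num.isdigit():
--             return int(num)
--     if ".L" in name:
--         # Example: act.L22.foo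
--         idx = name.find(".L")
--         rest = name[idx + 2 :]
--         num = ""
--         for ch in rest:
--             if ch.isdigit():
--                 num += ch
--             else:
--                 break
--         if num:
--             return int(num)
--     return None
-- ===== SOURCE B (Python) =====
-- from typing import Optional
--
-- def _extract_layer(name: str) -> Optional[int]:
--     # Explicit sliding-window scan instead of find/split: locate the first
--     # ".layer." by direct window comparison, then the first ".L" by a char-pair
--     # scan; extract the following segment / digit run with manual loops.
--     n = len(name)
--     rest = None
--     for i in range(n):
--         if name[i:i + 7] == ".layer.":
--             rest = name[i + 7:]
--             break
--     if rest is not None: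
--         seg = ""
--         for ch in rest:
--             if ch == ".":
--                 break
--             seg += ch
--         if seg.isdigit():
--             return int(seg)
--     for i in range(n - 1):
--         if name[i] == "." and name[i + 1] == "L":
--             digits = ""
--             for ch in name[i + 2:]:
--                 if not ch.isdigit():
--                     break
--                 digits += ch
--             if digits:
--                 return int(digits)
--             break
--     return None
-- ===== Notes on version B (the rewrite author's own statement) =====
-- stated objective: alternative
-- what changed: A locates the markers with the string library (substring membership, split with maxsplit 1, find) plus slicing; B performs an explicit sliding-window character scan for the dot-layer-dot marker and a char-pair scan for the dot-L marker, extracting the following segment and digit run with manual loops.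
import Mathlib
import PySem

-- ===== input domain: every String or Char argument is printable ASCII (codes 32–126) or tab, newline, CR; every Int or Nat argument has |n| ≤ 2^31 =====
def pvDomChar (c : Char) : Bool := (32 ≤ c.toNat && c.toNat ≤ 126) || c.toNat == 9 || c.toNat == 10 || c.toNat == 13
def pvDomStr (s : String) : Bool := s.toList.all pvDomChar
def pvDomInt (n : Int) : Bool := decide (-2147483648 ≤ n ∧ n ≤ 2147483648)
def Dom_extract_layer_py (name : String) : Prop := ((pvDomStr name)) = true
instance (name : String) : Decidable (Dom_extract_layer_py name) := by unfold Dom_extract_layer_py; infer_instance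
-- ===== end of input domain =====

-- B replaces A's find/split string-library pipeline by an explicit sliding-window
-- character scan (a different decomposition of the same task; no speed claim).

-- ===== PORT A =====
-- for ch in rest: if ch.isdigit(): num += ch  else: break
def aNumLoop : List Char → List Char → List Char
  | [], acc => acc
  | c :: cs, acc => if PySem.Chars.isdigit c then aNumLoop cs (acc ++ [c]) else acc

def extract_layer_py (name : String) : Option Int :=
  let layerRes : Option Int :=
    if PySem.Str.isIn ".layer." name then
      let parts := (PySem.Str.splitMax? name ".layer." 1).getD []
      let s := (PySem.List.pyGet? parts 1).getD ""
      let parts2 := (PySem.Str.splitMax? s "." 1).getD []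
      let num := (PySem.List.pyGet? parts2 0).getD ""
      if PySem.Str.strIsdigit num then
        PySem.Int.ofStr? num
      else none
    else none
  match layerRes with
  | some v => some v
  | none =>
    if PySem.Str.isIn ".L" name then
      let idx := PySem.Str.find name ".L"
      let rest := PySem.Str.slice name (some (idx + 2)) none
      let num := aNumLoop rest.toList []
      if num ≠ [] then PySem.Int.ofChars? num else none
    else none

-- ===== PORT B =====
-- for i in range(n): if name[i:i+7] == ".layer.": rest = name[i+7:]; break
def bScanLayer : List Char → Option (List Char)
  | [] => none
  | c :: cs =>
    if (c :: cs).take 7 = ".layer.".toList then some ((c :: cs).drop 7)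
    else bScanLayer cs

-- for ch in rest: if ch == ".": break; seg += ch
def bTakeSeg : List Char → List Char
  | [] => []
  | c :: cs => if c = '.' then [] else c :: bTakeSeg cs

-- for i in range(n-1): if name[i] == "." and name[i+1] == "L": ...; break
def bScanL : List Char → Option (List Char)
  | [] => none
  | [_] => none
  | a :: b :: cs => if a = '.' ∧ b = 'L' then some cs else bScanL (b :: cs)

-- for ch in name[i+2:]: if not ch.isdigit(): break; digits += ch
def bDigits : List Char → List Char
  | [] => []
  | c :: cs => if PySem.Chars.isdigit c then c :: bDigits cs else []

def extract_layer_py_alt (name : String) : Option Int :=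
  let cs := name.toList
  let r1 : Option Int :=
    match bScanLayer cs with
    | some rest =>
      let seg := bTakeSeg rest
      if PySem.Chars.strIsdigit seg then PySem.Int.ofChars? seg else none
    | none => none
  match r1 with
  | some v => some v
  | none =>
    match bScanL cs with
    | some rest =>
      let num := bDigits rest
      if num ≠ [] then PySem.Int.ofChars? num else none
    | none => none

-- ===== PRECONDITION & SPEC =====
def Spec_extract_layer_py (name : String) (out : Option Int) : Prop := out = extract_layer_py_alt name
instance (name : String) (out : Option Int) : Decidable (Spec_extract_layer_py name out) := by unfold Spec_extract_layer_py; infer_instance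

-- ===== CLAIM (what is proved, stated in full; the proofs are below) =====
def Claim_equal_extract_layer_py : Prop := ∀ (name : String), Dom_extract_layer_py name → Spec_extract_layer_py name (extract_layer_py name)

-- ===== LEMMAS AND PROOFS =====
-- fsp sep l: the first occurrence of sep in l, as (part before, part after the sep)
def fsp (sep : List Char) : List Char → Option (List Char × List Char)
  | [] => none
  | c :: t =>
    if sep.isPrefixOf (c :: t) then some ([], List.drop sep.length (c :: t))
    else (fsp sep t).map (fun p => (c :: p.1, p.2))

theorem findGo_eq (sub : List Char) (h : sub ≠ []) :
    ∀ (l : List Char) (k : Nat), PySem.Chars.find.go sub l k =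
      (match fsp sub l with
       | some (b, _) => ((k : Int) + b.length)
       | none => -1) := by
  intro l
  induction l with
  | nil => intro k; simp [PySem.Chars.find.go, fsp, List.isEmpty_iff, h]
  | cons c t ih =>
    intro k
    rw [PySem.Chars.find.go]
    by_cases hp : sub.isPrefixOf (c :: t) = true
    · simp [hp, fsp]
    · simp only [hp, if_false, fsp, Bool.false_eq_true, ih (k+1)]
      cases hf : fsp sub t with
      | none => simp
      | some p => cases p; push_cast; simp; ring

theorem goOne (sep : List Char) :
    ∀ (fuel : Nat) (l cur : List Char) (acc : List (List Char)), l.length < fuel →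
      PySem.Chars.splitOnMax.go sep fuel 1 l cur acc =
        acc.reverse ++ (match fsp sep l with
          | some (b, a) => [cur.reverse ++ b, a]
          | none => [cur.reverse ++ l]) := by
  intro fuel
  induction fuel with
  | zero => intro l cur acc h; omega
  | succ n ih =>
    intro l cur acc h
    cases l with
    | nil =>
      rw [PySem.Chars.splitOnMax.go]
      · simp [fsp]
      · omega
    | cons c rest =>
      rw [PySem.Chars.splitOnMax.go]
      by_cases hp : sep.isPrefixOf (c :: rest) = true
      · rw [PySem.Chars.splitOnMax.go.eq_def]
        simp only [hp, fsp, if_true]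
        rcases n with _ | n' <;> cases hd : List.drop sep.length (c :: rest) <;> simp
      · simp only [hp, if_false, Bool.false_eq_true]
        rw [ih rest (c :: cur) acc (by simp at h ⊢; omega)]
        simp only [fsp, hp, Bool.false_eq_true, if_false]
        cases hf : fsp sep rest with
        | none => simp
        | some p => cases p; simp

theorem fsp_decomp (sep : List Char) :
    ∀ (cs b a : List Char), fsp sep cs = some (b, a) → cs = b ++ sep ++ a := by
  intro cs
  induction cs with
  | nil => intro b a h; simp [fsp] at h
  | cons c t ih =>
    intro b a h
    by_cases hp : sep.isPrefixOf (c :: t) = true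
    · simp [fsp, hp] at h
      obtain ⟨hb, ha⟩ := h
      rw [List.isPrefixOf_iff_prefix] at hp
      obtain ⟨r, hr⟩ := hp
      subst hb ha
      simp [← hr, List.drop_left']
    · simp [fsp, hp] at h
      cases hf : fsp sep t with
      | none => simp [hf] at h
      | some p =>
        cases p with
        | mk b' a' =>
          simp [hf] at h
          obtain ⟨hb, ha⟩ := h
          have := ih b' a' hf
          subst hb ha
          simp [this]

theorem splitMaxOne (sep cs : List Char) :
    PySem.Chars.splitOnMax cs sep 1 =
      (match fsp sep cs with
       | some (b, a) => [b, a]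
       | none => [cs]) := by
  rw [PySem.Chars.splitOnMax, if_neg (by norm_num)]
  norm_num
  rw [goOne sep (cs.length + 1) cs [] [] (by omega)]
  cases hf : fsp sep cs with
  | none => simp
  | some p => cases p; simp

theorem pyGet?_pair {α : Type} (x y : α) : PySem.List.pyGet? [x, y] (1 : Int) = some y := by
  simp [PySem.List.pyGet?, PySem.List.pyIdx?]

theorem bScanLayer_eq (cs : List Char) :
    bScanLayer cs = (fsp ".layer.".toList cs).map (·.2) := by
  induction cs with
  | nil => simp [bScanLayer, fsp]
  | cons c t ih =>
    rw [bScanLayer, fsp]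
    have hiff : ((c :: t).take 7 = ".layer.".toList) ↔ (".layer.".toList.isPrefixOf (c :: t) = true) := by
      rw [List.isPrefixOf_iff_prefix, List.prefix_iff_eq_take]
      constructor <;> intro h <;> simpa using h.symm
    by_cases hp : ".layer.".toList.isPrefixOf (c :: t) = true
    · rw [if_pos (hiff.mpr hp), if_pos hp]
      simp
    · rw [if_neg (fun hc => hp (hiff.mp hc)), if_neg hp, ih]
      cases hf : fsp ".layer.".toList t <;> simp

theorem bScanL_eq (cs : List Char) :
    bScanL cs = (fsp ['.', 'L'] cs).map (·.2) := by
  induction cs with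
  | nil => simp [bScanL, fsp]
  | cons a t ih =>
    cases t with
    | nil =>
      rw [bScanL, fsp]
      rw [if_neg (by simp [List.isPrefixOf_iff_prefix])]
      simp [fsp]
    | cons b r =>
      rw [bScanL, fsp]
      have hiff : (a = '.' ∧ b = 'L') ↔ (['.', 'L'].isPrefixOf (a :: b :: r) = true) := by
        rw [List.isPrefixOf_iff_prefix, List.prefix_iff_eq_take]
        constructor
        · rintro ⟨h1, h2⟩; simp [h1, h2]
        · intro h; simp at h; exact ⟨h.1.symm, h.2.symm⟩
      by_cases hp : a = '.' ∧ b = 'L'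
      · rw [if_pos hp, if_pos (hiff.mp hp)]
        simp
      · rw [if_neg hp, if_neg (fun hc => hp (hiff.mpr hc)), ih]
        cases hf : fsp ['.', 'L'] (b :: r) <;> simp

theorem bTakeSeg_eq (a : List Char) :
    bTakeSeg a = (match fsp ['.'] a with | some (b, _) => b | none => a) := by
  induction a with
  | nil => simp [bTakeSeg, fsp]
  | cons c t ih =>
    rw [bTakeSeg, fsp]
    have hiff : (c = '.') ↔ (['.'].isPrefixOf (c :: t) = true) := by
      rw [List.isPrefixOf_iff_prefix]
      constructor
      · intro h; simp [h]
      · intro h; rcases h with ⟨r, hr⟩; simp at hr; exact hr.1.symm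
    by_cases hp : c = '.'
    · rw [if_pos hp, if_pos (hiff.mp hp)]
    · rw [if_neg hp, if_neg (fun hc => hp (hiff.mpr hc)), ih]
      cases hf : fsp ['.'] t with
      | none => simp
      | some p => cases p; simp

theorem aNumLoop_eq (l : List Char) : ∀ acc, aNumLoop l acc = acc ++ bDigits l := by
  induction l with
  | nil => intro acc; simp [aNumLoop, bDigits]
  | cons c t ih =>
    intro acc
    rw [aNumLoop, bDigits]
    by_cases hd : PySem.Chars.isdigit c = true
    · rw [if_pos hd, if_pos hd, ih]; simp
    · rw [if_neg hd, if_neg hd]; simp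

theorem layerEq (name : String) :
    (if PySem.Str.isIn ".layer." name then
      let parts := (PySem.Str.splitMax? name ".layer." 1).getD []
      let s := (PySem.List.pyGet? parts 1).getD ""
      let parts2 := (PySem.Str.splitMax? s "." 1).getD []
      let num := (PySem.List.pyGet? parts2 0).getD ""
      if PySem.Str.strIsdigit num then PySem.Int.ofStr? num else none
    else none)
    = (match bScanLayer name.toList with
       | some rest =>
         if PySem.Chars.strIsdigit (bTakeSeg rest) then PySem.Int.ofChars? (bTakeSeg rest)
         else none
       | none => none) := by
  have hm7 : (".layer.".toList : List Char) ≠ [] := by decide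
  have hd1 : ((".".toList : List Char)) ≠ [] := by decide
  rw [bScanLayer_eq]
  cases hM : fsp ".layer.".toList name.toList with
  | none =>
    simp only [PySem.Str.isIn, PySem.Chars.isIn, PySem.Chars.find, findGo_eq _ hm7, hM]
    simp
  | some p =>
    obtain ⟨b, a⟩ := p
    simp only [PySem.Str.isIn, PySem.Chars.isIn, PySem.Chars.find, findGo_eq _ hm7, hM]
    rw [if_pos (by simp)]
    have e1 : (".layer.".toList : List Char).isEmpty = false := by decide
    have e2 : ((".".toList : List Char)).isEmpty = false := by decide
    have hdot : ((".".toList : List Char)) = ['.'] := by decide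
    have hofl : ∀ l : List Char, (String.ofList l).toList = l := fun l => by simp
    have hmrk : (".layer.".toList : List Char) = ['.','l','a','y','e','r','.'] := by decide
    have e1' : (['.','l','a','y','e','r','.'] : List Char).isEmpty = false := rfl
    have e2' : ((['.'] : List Char)).isEmpty = false := rfl
    have hM' : fsp ['.','l','a','y','e','r','.'] name.toList = some (b, a) := hmrk ▸ hM
    simp only [PySem.Str.splitMax?, PySem.Chars.splitMax?, e1', e2', Bool.false_eq_true,
      if_false, splitMaxOne ['.','l','a','y','e','r','.'] name.toList, hM',
      Option.getD_some, Option.map_some, List.map_cons,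
      List.map_nil, pyGet?_pair, hdot, hofl, PySem.Str.strIsdigit, PySem.Int.ofStr?,
      splitMaxOne ['.'] a, bTakeSeg_eq]
    cases hA : fsp ['.'] a with
    | none => simp
    | some q => obtain ⟨b2, a2⟩ := q; simp

theorem lEq (name : String) :
    (if PySem.Str.isIn ".L" name then
      let idx := PySem.Str.find name ".L"
      let rest := PySem.Str.slice name (some (idx + 2)) none
      let num := aNumLoop rest.toList []
      if num ≠ [] then PySem.Int.ofChars? num else none
    else none)
    = (match bScanL name.toList with
       | some rest =>
         if bDigits rest ≠ [] then PySem.Int.ofChars? (bDigits rest) else none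
       | none => none) := by
  have hL2 : ((".L".toList : List Char)) = ['.', 'L'] := by decide
  rw [bScanL_eq]
  cases hL : fsp ['.', 'L'] name.toList with
  | none =>
    simp only [PySem.Str.isIn, PySem.Chars.isIn, PySem.Chars.find, hL2,
      findGo_eq ['.', 'L'] (by decide), hL]
    simp
  | some p =>
    obtain ⟨b, a⟩ := p
    simp only [PySem.Str.isIn, PySem.Str.find, PySem.Chars.isIn, PySem.Chars.find, hL2,
      findGo_eq ['.', 'L'] (by decide), hL]
    rw [if_pos (by simp)]
    have hcs : name.toList = b ++ ['.', 'L'] ++ a := fsp_decomp _ _ _ _ hL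
    have hrest : (PySem.Str.slice name (some ((((0:Nat)) : Int) + b.length + 2)) none).toList = a := by
      simp only [PySem.Str.slice]
      have : ((((0:Nat)) : Int) + b.length + 2) = ((b.length + 2 : Nat) : Int) := by push_cast; ring
      rw [this]
      have hnn : (0 : Int) ≤ ((b.length + 2 : Nat) : Int) := by positivity
      simp only [PySem.Chars.slice_eq_listSlice, PySem.List.slice_from _ hnn]
      rw [hcs]
      have h2 : ((b.length + 2 : Nat) : Int).toNat = b.length + 2 := by omega
      rw [h2]
      have : b.length + 2 = (b ++ ['.', 'L']).length := by simp
      rw [this, List.drop_left]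
      simp
    rw [hrest, aNumLoop_eq]
    simp

-- ===== VERDICT (by name: the statement is the Claim_ definition above) =====
theorem extract_layer_py_spec : Claim_equal_extract_layer_py := by
  intro name _
  unfold Spec_extract_layer_py
  unfold extract_layer_py extract_layer_py_alt
  simp only [layerEq, lEq]
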